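-- pv_equiv track=rewrite | github.com/adusa1019/atcoder | ABC136/C.py | solve
-- ===== SOURCE A (Python) =====
-- def solve(string):
--     n, *h = map(int, string.split())
--     curr = None
--     for _h in h[::-1]:
--         if curr is None:
--             curr = _h
--             continue
--         if _h <= curr:
--             curr = _h
--             continue
--         if _h - 1 == curr:
--             continue
--         return "No"
--     return "Yes"
-- ===== SOURCE B (Python) =====
-- def solve(string):
--     n, *h = map(int, string.split())
--     if not h:
--         return "Yes"
--     a = [h[0] - 1]
--     for x in h[1:]:
--         a.append(x - 1 if x - 1 >= a[-1] else x)
--     return "Yes" if all(u <= v for u, v in zip(a, a[1:])) else "No"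
-- ===== Notes on version B (the rewrite author's own statement) =====
-- stated objective: alternative
-- what changed: Replaces A's single right-to-left scan with early return by two staged forward passes: first materialise the greedy smallest-feasible assignment as a list, then separately check that list is non-decreasing with zip/all.
import Mathlib
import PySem

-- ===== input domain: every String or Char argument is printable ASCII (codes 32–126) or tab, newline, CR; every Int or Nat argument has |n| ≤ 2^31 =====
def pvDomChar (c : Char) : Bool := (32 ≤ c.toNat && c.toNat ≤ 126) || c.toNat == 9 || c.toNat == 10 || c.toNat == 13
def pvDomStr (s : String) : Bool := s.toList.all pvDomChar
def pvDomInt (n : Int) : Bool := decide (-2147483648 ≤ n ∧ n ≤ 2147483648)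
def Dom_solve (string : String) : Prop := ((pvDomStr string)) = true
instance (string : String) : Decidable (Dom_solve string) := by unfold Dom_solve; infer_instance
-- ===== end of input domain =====

-- B replaces A's backward scan with early return by two forward passes: build the greedy
-- smallest-feasible assignment as a list, then check it is non-decreasing; same O(n) cost.

-- ===== PORT A =====
-- the 'for _h in h[::-1]' loop of A, with curr = None encoded as Option.none
def solveLoopA : Option Int → List Int → String
  | _, [] => "Yes"
  | none, x :: xs => solveLoopA (some x) xs
  | some c, x :: xs =>
    if x ≤ c then solveLoopA (some x) xs
    else if x - 1 = c then solveLoopA (some c) xs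
    else "No"

def solve (string : String) : String :=
  match (PySem.Str.split₀ string).mapM PySem.Int.ofStr? with
  | none => ""        -- int() raises ValueError in Python: excluded by Pre_solve
  | some [] => ""     -- unpacking raises ValueError in Python: excluded by Pre_solve
  | some (_n :: h) => solveLoopA none ((PySem.List.slice? h none none (-1)).getD [])

-- ===== PORT B =====
-- pass 1 of B: the append loop building a (each element is x-1 if it fits above the last, else x)
def buildAsg (p : Int) : List Int → List Int
  | [] => []
  | x :: xs => (if p ≤ x - 1 then x - 1 else x) :: buildAsg (if p ≤ x - 1 then x - 1 else x) xs

-- pass 2 of B: all(u <= v for u, v in zip(a, a[1:]))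
def allAdjLe (a : List Int) : Bool := (a.zip a.tail).all (fun uv => decide (uv.1 ≤ uv.2))

def solve_alt (string : String) : String :=
  match (PySem.Str.split₀ string).mapM PySem.Int.ofStr? with
  | none => ""        -- same ValueError as A: excluded by Pre_solve
  | some [] => ""     -- same ValueError as A: excluded by Pre_solve
  | some (_n :: h) =>
    match h with
    | [] => "Yes"
    | x :: xs => if allAdjLe ((x - 1) :: buildAsg (x - 1) xs) then "Yes" else "No"

-- ===== PRECONDITION & SPEC =====
-- Pre_ excludes exactly the inputs on which Python raises ValueError: no token at all
-- (the unpacking 'n, *h = …' fails) or a token int() cannot parse.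
def Pre_solve (string : String) : Prop :=
  PySem.Str.split₀ string ≠ [] ∧
    ∀ t ∈ PySem.Str.split₀ string, (PySem.Int.ofStr? t).isSome = true
instance (string : String) : Decidable (Pre_solve string) := by unfold Pre_solve; infer_instance
def pvWitness_solve : String := "3 1 2 3"

def Spec_solve (string : String) (out : String) : Prop := out = solve_alt string
instance (string : String) (out : String) : Decidable (Spec_solve string out) := by unfold Spec_solve; infer_instance

-- ===== CLAIM (what is proved, stated in full; the proofs are below) =====
def Claim_equal_solve : Prop := ∀ (string : String), Dom_solve string → Pre_solve string → Spec_solve string (solve string)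

-- ===== LEMMAS AND PROOFS =====

-- the common specification: each height may be decremented by at most 1, result non-decreasing
abbrev Asg (h a : List Int) : Prop := List.Forall₂ (fun x v => v = x - 1 ∨ v = x) h a

def Feas (h : List Int) : Prop := ∃ a, Asg h a ∧ List.IsChain (· ≤ ·) a

theorem forall2_snoc {R : Int → Int → Prop} {l : List Int} {x : Int} {u : List Int} :
    List.Forall₂ R (l ++ [x]) u ↔ ∃ u₁ b, List.Forall₂ R l u₁ ∧ R x b ∧ u = u₁ ++ [b] := by
  induction l generalizing u with
  | nil =>
    simp only [List.nil_append]
    constructor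
    · rintro h; cases h with | cons hb h => cases h; exact ⟨[], _, List.Forall₂.nil, hb, rfl⟩
    · rintro ⟨u₁, b, h₁, hb, rfl⟩; cases h₁; exact List.Forall₂.cons hb List.Forall₂.nil
  | cons a l ih =>
    constructor
    · rintro h; cases h with
      | cons ha h =>
        obtain ⟨u₁, b, h₁, hb, rfl⟩ := ih.mp h
        exact ⟨_ :: u₁, b, List.Forall₂.cons ha h₁, hb, rfl⟩
    · rintro ⟨u₁, b, h₁, hb, rfl⟩
      cases h₁ with
      | cons ha h₁ => exact List.Forall₂.cons ha (ih.mpr ⟨_, b, h₁, hb, rfl⟩)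

theorem chain_raise_last {b : List Int} {v w : Int} (h : List.IsChain (· ≤ ·) (b ++ [v]))
    (hvw : v ≤ w) : List.IsChain (· ≤ ·) (b ++ [w]) := by
  rw [List.isChain_append] at h ⊢
  refine ⟨h.1, by simp, fun x hx y hy => ?_⟩
  simp only [List.head?_cons, Option.mem_def, Option.some.injEq] at hy
  subst hy
  exact le_trans (h.2.2 x hx v (by simp)) hvw

theorem chain_snoc {b : List Int} {v w : Int} (h : List.IsChain (· ≤ ·) (b ++ [v]))
    (hvw : v ≤ w) : List.IsChain (· ≤ ·) ((b ++ [v]) ++ [w]) := by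
  rw [List.isChain_append]
  refine ⟨h, by simp, fun x hx y hy => ?_⟩
  simp only [List.getLast?_concat, Option.mem_def, Option.some.injEq] at hx
  simp only [List.head?_cons, Option.mem_def, Option.some.injEq] at hy
  subst hx; subst hy; exact hvw

theorem chain_split_last {b : List Int} {v c : Int}
    (h : List.IsChain (· ≤ ·) ((b ++ [v]) ++ [c])) :
    List.IsChain (· ≤ ·) (b ++ [v]) ∧ v ≤ c := by
  rw [List.isChain_append] at h
  exact ⟨h.1, h.2.2 v (by simp) c (by simp)⟩

theorem chain_lower_head {a : List Int} {v w : Int} (h : List.IsChain (· ≤ ·) (v :: a))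
    (hwv : w ≤ v) : List.IsChain (· ≤ ·) (w :: a) := by
  rw [List.isChain_cons] at h ⊢
  exact ⟨fun y hy => le_trans hwv (h.1 y hy), h.2⟩

-- A's backward loop succeeds iff the elements already seen (in forward order t) admit a
-- non-decreasing assignment whose last value is ≤ the current bound c
theorem loopA_yes (t : List Int) : ∀ c : Int,
    (solveLoopA (some c) t.reverse = "Yes" ↔
      ∃ b, Asg t b ∧ List.IsChain (· ≤ ·) (b ++ [c])) := by
  induction t using List.reverseRecOn with
  | nil =>
    intro c
    simp only [List.reverse_nil, solveLoopA]
    constructor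
    · intro _; exact ⟨[], List.Forall₂.nil, by simp⟩
    · intro _; trivial
  | append_singleton l y ih =>
    intro c
    rw [List.reverse_append, List.reverse_singleton, List.singleton_append]
    show (if y ≤ c then solveLoopA (some y) l.reverse
          else if y - 1 = c then solveLoopA (some c) l.reverse
          else "No") = "Yes" ↔ _
    constructor
    · intro hyes
      by_cases hyc : y ≤ c
      · rw [if_pos hyc] at hyes
        obtain ⟨b, hb, hchain⟩ := (ih y).mp hyes
        refine ⟨b ++ [y], forall2_snoc.mpr ⟨b, y, hb, Or.inr rfl, rfl⟩, chain_snoc hchain hyc⟩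
      · rw [if_neg hyc] at hyes
        by_cases hy1 : y - 1 = c
        · rw [if_pos hy1] at hyes
          obtain ⟨b, hb, hchain⟩ := (ih c).mp hyes
          refine ⟨b ++ [y - 1], forall2_snoc.mpr ⟨b, y - 1, hb, Or.inl rfl, rfl⟩, ?_⟩
          rw [hy1]; exact chain_snoc hchain le_rfl
        · rw [if_neg hy1] at hyes; exact absurd hyes (by decide)
    · rintro ⟨b', hb', hchain⟩
      obtain ⟨b, v, hb, hv, rfl⟩ := forall2_snoc.mp hb'
      obtain ⟨hchain', hvc⟩ := chain_split_last hchain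
      by_cases hyc : y ≤ c
      · rw [if_pos hyc]
        exact (ih y).mpr ⟨b, hb, chain_raise_last hchain' (by rcases hv with h | h <;> omega)⟩
      · rw [if_neg hyc]
        have hy1 : y - 1 = c := by rcases hv with h | h <;> omega
        rw [if_pos hy1]
        have hvc' : v = c := by rcases hv with h | h <;> omega
        exact (ih c).mpr ⟨b, hb, hvc' ▸ hchain'⟩

@[simp] theorem allAdjLe_pair (p c : Int) (t : List Int) :
    allAdjLe (p :: c :: t) = (decide (p ≤ c) && allAdjLe (c :: t)) := by
  simp [allAdjLe]

-- B's two passes succeed iff the remaining elements admit a non-decreasing assignment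
-- whose values all stay ≥ the running minimum p
theorem buildAsg_yes (xs : List Int) : ∀ p : Int,
    (allAdjLe (p :: buildAsg p xs) = true ↔
      ∃ a, Asg xs a ∧ List.IsChain (· ≤ ·) (p :: a)) := by
  induction xs with
  | nil =>
    intro p
    constructor
    · intro _; exact ⟨[], List.Forall₂.nil, by simp⟩
    · intro _; rfl
  | cons x xs ih =>
    intro p
    show allAdjLe (p :: (if p ≤ x - 1 then x - 1 else x) :: buildAsg _ xs) = true ↔ _
    rw [allAdjLe_pair, Bool.and_eq_true, decide_eq_true_iff]
    constructor
    · rintro ⟨hpc, hrest⟩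
      obtain ⟨a, ha, hchain⟩ := (ih _).mp hrest
      refine ⟨(if p ≤ x - 1 then x - 1 else x) :: a,
        List.Forall₂.cons (by split_ifs <;> simp) ha, ?_⟩
      rw [List.isChain_cons]
      refine ⟨fun y hy => ?_, hchain⟩
      simp only [List.head?_cons, Option.mem_def, Option.some.injEq] at hy
      omega
    · rintro ⟨a', ha', hchain⟩
      cases ha' with
      | cons hv ha =>
        rename_i v a
        rw [List.isChain_cons] at hchain
        have hpv : p ≤ v := hchain.1 v (by simp)
        by_cases hp1 : p ≤ x - 1
        · rw [if_pos hp1]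
          refine ⟨by omega, (ih _).mpr ⟨a, ha, ?_⟩⟩
          exact chain_lower_head hchain.2 (by rcases hv with h | h <;> omega)
        · rw [if_neg hp1]
          have hvx : v = x := by rcases hv with h | h <;> omega
          exact ⟨by omega, (ih _).mpr ⟨a, ha, hvx ▸ hchain.2⟩⟩

theorem loopA_cases : ∀ (c : Option Int) (l : List Int),
    solveLoopA c l = "Yes" ∨ solveLoopA c l = "No" := by
  intro c l
  induction l generalizing c with
  | nil => left; cases c <;> rfl
  | cons x xs ih =>
    cases c with
    | none => exact ih (some x)
    | some c =>
      have : solveLoopA (some c) (x :: xs) =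
          (if x ≤ c then solveLoopA (some x) xs
           else if x - 1 = c then solveLoopA (some c) xs else "No") := rfl
      rw [this]
      split_ifs
      · exact ih (some x)
      · exact ih (some c)
      · right; rfl

theorem A_iff_feas (h : List Int) (hne : h ≠ []) :
    solveLoopA none h.reverse = "Yes" ↔ Feas h := by
  obtain ⟨z, hz⟩ : ∃ z, h.getLast hne = z := ⟨_, rfl⟩
  have hsplit : h.dropLast ++ [z] = h := hz ▸ List.dropLast_concat_getLast hne
  have hrev : h.reverse = z :: h.dropLast.reverse := by
    conv_lhs => rw [← hsplit]
    rw [List.reverse_append, List.reverse_singleton, List.singleton_append]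
  rw [hrev]
  show solveLoopA (some z) h.dropLast.reverse = "Yes" ↔ _
  rw [loopA_yes]
  constructor
  · rintro ⟨b, hb, hchain⟩
    refine ⟨b ++ [z], ?_, hchain⟩
    show List.Forall₂ _ h _
    rw [← hsplit]
    exact forall2_snoc.mpr ⟨b, _, hb, Or.inr rfl, rfl⟩
  · rintro ⟨a, ha, hchain⟩
    have ha' : List.Forall₂ (fun x v => v = x - 1 ∨ v = x) (h.dropLast ++ [z]) a := by
      rw [hsplit]; exact ha
    obtain ⟨b, v, hb, hv, rfl⟩ := forall2_snoc.mp ha'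
    exact ⟨b, hb, chain_raise_last hchain (by rcases hv with h' | h' <;> omega)⟩

theorem B_iff_feas (x : Int) (xs : List Int) :
    allAdjLe ((x - 1) :: buildAsg (x - 1) xs) = true ↔ Feas (x :: xs) := by
  rw [buildAsg_yes]
  constructor
  · rintro ⟨a, ha, hchain⟩
    exact ⟨(x - 1) :: a, List.Forall₂.cons (Or.inl rfl) ha, hchain⟩
  · rintro ⟨a', ha', hchain⟩
    cases ha' with
    | cons hv ha =>
      rename_i v a
      exact ⟨a, ha, chain_lower_head hchain (by rcases hv with h' | h' <;> omega)⟩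

theorem core_eq (h : List Int) :
    solveLoopA none h.reverse =
      (match h with
       | [] => "Yes"
       | x :: xs => if allAdjLe ((x - 1) :: buildAsg (x - 1) xs) then "Yes" else "No") := by
  cases h with
  | nil => rfl
  | cons x xs =>
    have hiff := (A_iff_feas (x :: xs) (by simp)).trans (B_iff_feas x xs).symm
    rcases loopA_cases none (x :: xs).reverse with hA | hA <;>
      by_cases hB : allAdjLe ((x - 1) :: buildAsg (x - 1) xs) = true <;>
        simp_all

-- ===== VERDICT (by name: the statement is the Claim_ definition above) =====
theorem solve_spec : Claim_equal_solve := by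
  intro string _hdom _hpre
  unfold Spec_solve solve solve_alt
  cases hm : (PySem.Str.split₀ string).mapM PySem.Int.ofStr? with
  | none => rfl
  | some l =>
    cases l with
    | nil => rfl
    | cons n h =>
      show solveLoopA none ((PySem.List.slice? h none none (-1)).getD []) = _
      rw [PySem.List.slice?_none_none_neg_one]
      exact core_eq h
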